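-- pv_equiv track=rewrite | github.com/iaced102/findjob | buoi4/trantham/demo_split.py | demo_split
-- ===== SOURCE A (Python) =====
-- def demo_split(string, parameter1) :
--     result = []
--     word = ""
--     for i in range(len(string)) :
--         if parameter1 == "" :
--             result.append(string[i])
--         elif parameter1 == "''" :
--             result.append(string[i])
--         else:
--             if string[i] != parameter1 :
--                 word += string[i]
--             else:
--                 result.append(word)
--                 word=''
--     return result
-- ===== SOURCE B (Python) =====
-- def demo_split(string, parameter1):
--     if parameter1 == "" or parameter1 == "''":
--         return list(string)
--     idxs = [i for i, c in enumerate(string) if c == parameter1]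
--     out = []
--     start = 0
--     for i in idxs:
--         out.append(string[start:i])
--         start = i + 1
--     return out
-- ===== Notes on version B (the rewrite author's own statement) =====
-- stated objective: faster
-- what changed: B replaces A's char-by-char accumulator loop (building each word by repeated string concatenation) by first collecting the delimiter positions with enumerate and then slicing the string between consecutive positions (dropping the tail segment, as A does); the empty/"''" delimiter cases become list(string).
import Mathlib
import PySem

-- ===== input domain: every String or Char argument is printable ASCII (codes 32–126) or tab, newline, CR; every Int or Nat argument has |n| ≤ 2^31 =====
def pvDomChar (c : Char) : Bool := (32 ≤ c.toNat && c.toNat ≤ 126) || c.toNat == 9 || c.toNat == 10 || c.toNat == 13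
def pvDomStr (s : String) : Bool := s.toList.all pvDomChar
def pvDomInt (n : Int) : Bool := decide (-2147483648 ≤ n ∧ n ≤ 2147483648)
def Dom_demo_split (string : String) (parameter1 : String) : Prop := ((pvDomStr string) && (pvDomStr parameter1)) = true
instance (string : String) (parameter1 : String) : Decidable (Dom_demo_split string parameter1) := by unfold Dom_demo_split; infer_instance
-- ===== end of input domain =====

-- B replaces A's char-by-char accumulator loop by collecting delimiter positions and slicing between them.

-- ===== PORT A =====
-- A iterates i over range(len(string)); string[i] is always in range, so the loop is ported as a
-- fold of its body (aStep) over the character list; `word` is the List Char of the Chars domain,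
-- and `string[i] != parameter1` compares the one-char string with parameter1.
def aStep (p1 : String) (acc : List String × List Char) (c : Char) : List String × List Char :=
  if p1 = "" then (acc.1 ++ [String.mk [c]], acc.2)
  else if p1 = "''" then (acc.1 ++ [String.mk [c]], acc.2)
  else if String.mk [c] ≠ p1 then (acc.1, acc.2 ++ [c])
  else (acc.1 ++ [String.mk acc.2], [])

def demo_split (string : String) (parameter1 : String) : List String :=
  (string.toList.foldl (aStep parameter1) ([], [])).1

-- ===== PORT B =====
-- idxs = [i for i, c in enumerate(string) if c == parameter1]; then slice between consecutive
-- delimiter positions (string[start:i]), dropping the tail segment after the last delimiter.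
def bStep (cs : List Char) (acc : List String × Int) (i : Int) : List String × Int :=
  (acc.1 ++ [String.mk (PySem.List.slice cs (some acc.2) (some i))], i + 1)

def demo_split_alt (string : String) (parameter1 : String) : List String :=
  let cs := string.toList
  if parameter1 = "" ∨ parameter1 = "''" then
    cs.map (fun c => String.mk [c])
  else
    let idxs : List Int :=
      (PySem.List.enumerate cs 0).filterMap
        (fun p => if String.mk [p.2] = parameter1 then some p.1 else none)
    (idxs.foldl (bStep cs) ([], 0)).1

-- ===== PRECONDITION & SPEC =====
def Spec_demo_split (string : String) (parameter1 : String) (out : List String) : Prop := out = demo_split_alt string parameter1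
instance (string : String) (parameter1 : String) (out : List String) : Decidable (Spec_demo_split string parameter1 out) := by unfold Spec_demo_split; infer_instance

-- ===== CLAIM (what is proved, stated in full; the proofs are below) =====
def Claim_equal_demo_split : Prop := ∀ (string : String) (parameter1 : String), Dom_demo_split string parameter1 → Spec_demo_split string parameter1 (demo_split string parameter1)

-- ===== LEMMAS AND PROOFS =====

-- Segment list of A's loop in the splitting case: pending word `w`, tail segment dropped.
def segChars (p1 : String) : List Char → List Char → List (List Char)
  | [], _ => []
  | c :: cs, w =>
      if String.mk [c] = p1 then w :: segChars p1 cs [] else segChars p1 cs (w ++ [c])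

-- A's fold, listing case (parameter1 = "" or "''")
theorem aFold_list (p1 : String) (h : p1 = "" ∨ p1 = "''") :
    ∀ (cs : List Char) (res : List String) (w : List Char),
      (cs.foldl (aStep p1) (res, w)).1 = res ++ cs.map (fun c => String.mk [c]) := by
  intro cs
  induction cs with
  | nil => intro res w; simp
  | cons c cs ih =>
      intro res w
      have hstep : aStep p1 (res, w) c = (res ++ [String.mk [c]], w) := by
        rcases h with h | h <;> simp [aStep, h]
      rw [List.foldl_cons, hstep, ih]
      simp

-- A's fold, splitting case
theorem aFold_split (p1 : String) (h1 : p1 ≠ "") (h2 : p1 ≠ "''") :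
    ∀ (cs : List Char) (res : List String) (w : List Char),
      (cs.foldl (aStep p1) (res, w)).1 = res ++ (segChars p1 cs w).map String.mk := by
  intro cs
  induction cs with
  | nil => intro res w; simp [segChars]
  | cons c cs ih =>
      intro res w
      by_cases hc : String.mk [c] = p1
      · have hstep : aStep p1 (res, w) c = (res ++ [String.mk w], []) := by
          simp [aStep, h1, h2, hc]
        rw [List.foldl_cons, hstep, ih]
        simp [segChars, hc]
      · have hstep : aStep p1 (res, w) c = (res, w ++ [c]) := by
          simp [aStep, h1, h2, hc]
        rw [List.foldl_cons, hstep, ih]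
        simp [segChars, hc]

-- match-index list of B, structurally
def midx (p1 : String) : List Char → Int → List Int
  | [], _ => []
  | c :: cs, s =>
      (if String.mk [c] = p1 then [s] else []) ++ midx p1 cs (s + 1)

theorem midx_eq_filterMap (p1 : String) :
    ∀ (cs : List Char) (s : Int),
      (PySem.List.enumerate cs s).filterMap
        (fun p => if String.mk [p.2] = p1 then some p.1 else none)
      = midx p1 cs s := by
  intro cs
  induction cs with
  | nil => intro s; simp [PySem.List.enumerate_nil, midx]
  | cons c cs ih =>
      intro s
      by_cases hc : String.mk [c] = p1 <;>
        simp [PySem.List.enumerate_cons, hc, midx, ih]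

-- Main invariant of B's fold over the match indices of the suffix cs0.drop n, with
-- pending-segment start st: it appends exactly the segments of the suffix.
theorem bFold_inv (p1 : String) (cs0 : List Char) :
    ∀ (t : List Char) (n st : Nat) (out : List String),
      st ≤ n → n ≤ cs0.length → cs0.drop n = t →
      ((midx p1 t (n : Int)).foldl (bStep cs0) (out, ((st : Nat) : Int))).1
        = out ++ (segChars p1 t ((cs0.drop st).take (n - st))).map String.mk := by
  intro t
  induction t with
  | nil => intro n st out _ _ _; simp [midx, segChars]
  | cons c t ih =>
      intro n st out hstn hn hdrop
      have hnlt : n < cs0.length := by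
        by_contra hcon
        have : cs0.drop n = [] := List.drop_eq_nil_of_le (by omega)
        simp [this] at hdrop
      have hdd := List.drop_drop (i := 1) (j := n) (l := cs0)
      have hdrop' : cs0.drop (n + 1) = t := by
        rw [← hdd, hdrop]
        simp
      have hget : cs0[n]? = some c := by
        have h1 : (cs0.drop n)[0]? = cs0[n + 0]? := List.getElem?_drop
        rw [hdrop] at h1
        simpa using h1.symm
      have hmidx : midx p1 (c :: t) (n : Int)
          = (if String.mk [c] = p1 then [(n : Int)] else []) ++ midx p1 t ((n : Int) + 1) := rfl
      have hcast : ((n : Int) + 1) = (((n + 1 : Nat)) : Int) := by push_cast; ring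
      by_cases hc : String.mk [c] = p1
      · -- delimiter at position n : emit slice cs0[st:n], restart at n+1
        have hslice : PySem.List.slice cs0 (some ((st : Nat) : Int)) (some ((n : Nat) : Int))
            = (cs0.drop st).take (n - st) := PySem.List.slice_natCast cs0 st n
        have hstep : bStep cs0 (out, ((st : Nat) : Int)) (n : Int)
            = (out ++ [String.mk ((cs0.drop st).take (n - st))], (n : Int) + 1) := by
          simp [bStep, hslice]
        have ihx := ih (n + 1) (n + 1) (out ++ [String.mk ((cs0.drop st).take (n - st))])
          (le_refl _) (by omega) hdrop'
        simp only [Nat.sub_self, List.take_zero] at ihx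
        rw [hmidx, if_pos hc, List.singleton_append, List.foldl_cons, hstep, hcast, ihx]
        simp [segChars, hc]
      · -- ordinary character: pending word grows by c
        have ihx := ih (n + 1) st out (by omega) (by omega) hdrop'
        have hword : (cs0.drop st).take (n + 1 - st)
            = (cs0.drop st).take (n - st) ++ [c] := by
          have hcell : (cs0.drop st)[n - st]? = some c := by
            rw [List.getElem?_drop, show st + (n - st) = n by omega, hget]
          have htk := List.take_add_one (l := cs0.drop st) (i := n - st)
          rw [show n + 1 - st = (n - st) + 1 by omega, htk, hcell]
          simp
        rw [← hcast] at ihx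
        rw [hmidx, if_neg hc, List.nil_append, ihx, hword]
        simp [segChars, hc]

-- ===== VERDICT (by name: the statement is the Claim_ definition above) =====
theorem demo_split_spec : Claim_equal_demo_split := by
  intro string parameter1 _
  unfold Spec_demo_split demo_split demo_split_alt
  by_cases h : parameter1 = "" ∨ parameter1 = "''"
  · rw [if_pos h, aFold_list parameter1 h]
    simp
  · push_neg at h
    rw [if_neg (by tauto : ¬ (parameter1 = "" ∨ parameter1 = "''"))]
    rw [aFold_split parameter1 h.1 h.2, midx_eq_filterMap]
    have := bFold_inv parameter1 string.toList string.toList 0 0 []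
      (le_refl 0) (Nat.zero_le _) (by simp)
    simpa using this.symm
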